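-- pv_equiv track=rewrite | github.com/nikmillerson/olympiade | tour1_task1_2024.py | right_iteration
-- ===== SOURCE A (Python) =====
-- alphabet = ['A','B','C','D','E','F','G','H','I','J','K','L','M','N','O','P','Q','R','S','T','U','V','W','X','Y','Z']
--
-- def right_iteration(begin_letter, target_letter):
--     right_counter = 0
--     if begin_letter == target_letter:
--         return right_counter
--     current_letter = begin_letter
--     letter_index = index_getter(current_letter)
--     while current_letter != target_letter:
--         if (letter_index + right_counter) != 25:
--             right_counter += 1
--             current_letter = alphabet[letter_index + right_counter]
--         else:
--             right_counter += 1
--             current_letter = alphabet[letter_index + right_counter - 26]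
--     return right_counter
--
-- def index_getter(some_letter):
--     for x in range(len(alphabet)):
--         if alphabet[x] == some_letter:
--             some_letter_index = x
--     return some_letter_index
-- ===== SOURCE B (Python) =====
-- alphabet = ['A','B','C','D','E','F','G','H','I','J','K','L','M','N','O','P','Q','R','S','T','U','V','W','X','Y','Z']
--
-- def index_getter(some_letter):
--     for x in range(len(alphabet)):
--         if alphabet[x] == some_letter:
--             some_letter_index = x
--     return some_letter_index
--
-- def right_iteration(begin_letter, target_letter):
--     if begin_letter == target_letter:
--         return 0
--     return (index_getter(target_letter) - index_getter(begin_letter)) % 26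
-- ===== Notes on version B (the rewrite author's own statement) =====
-- stated objective: simpler
-- what changed: Replaced the step-by-step rightward walk over the alphabet list by a single closed-form modular computation (ti - bi) % 26 from the two indices.
-- crash fix: When both letters are distinct uppercase letters with target strictly left of begin and target is not 'A', A's walk runs past index 25 and raises IndexError, while B returns the cyclic distance (ti - bi) % 26. — e.g. on right_iteration("C", "B"): A raises IndexError, B returns 25
import Mathlib
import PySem

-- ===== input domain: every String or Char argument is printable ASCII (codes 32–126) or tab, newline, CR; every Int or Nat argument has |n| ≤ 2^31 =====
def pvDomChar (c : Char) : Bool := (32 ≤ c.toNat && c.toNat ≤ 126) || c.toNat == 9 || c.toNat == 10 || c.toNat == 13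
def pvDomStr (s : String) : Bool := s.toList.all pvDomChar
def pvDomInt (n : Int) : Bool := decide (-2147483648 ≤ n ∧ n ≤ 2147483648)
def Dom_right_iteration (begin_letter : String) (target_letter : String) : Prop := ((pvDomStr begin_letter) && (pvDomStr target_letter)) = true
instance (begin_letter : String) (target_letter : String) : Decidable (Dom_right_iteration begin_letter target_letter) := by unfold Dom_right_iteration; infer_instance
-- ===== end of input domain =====

-- B replaces A's step-by-step rightward walk by the closed form (ti - bi) % 26 (objective: simpler).


-- ===== PORT A =====
def pvAlphabet : List String :=
  ["A","B","C","D","E","F","G","H","I","J","K","L","M","N","O","P","Q","R","S","T","U","V","W","X","Y","Z"]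

-- index_getter: last matching index; none = some_letter_index unbound (UnboundLocalError)
def index_getter (some_letter : String) : Option Int :=
  (PySem.List.pyRange 0 26 1).foldl
    (fun acc x => if PySem.List.pyGet? pvAlphabet x = some some_letter then some x else acc) none

-- the while loop of A; fuel-bounded (30 > any terminating run); on fuel exhaustion or
-- out-of-range index (Python IndexError, excluded by Pre_) returns the counter
def pvLoopA (target_letter : String) (letter_index : Int) : Nat → Int → String → Int
  | 0, right_counter, _ => right_counter
  | fuel + 1, right_counter, current_letter =>
    if current_letter = target_letter then right_counter
    else if letter_index + right_counter ≠ 25 then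
      match PySem.List.pyGet? pvAlphabet (letter_index + (right_counter + 1)) with
      | some l => pvLoopA target_letter letter_index fuel (right_counter + 1) l
      | none => right_counter + 1
    else
      match PySem.List.pyGet? pvAlphabet (letter_index + (right_counter + 1) - 26) with
      | some l => pvLoopA target_letter letter_index fuel (right_counter + 1) l
      | none => right_counter + 1

def right_iteration (begin_letter : String) (target_letter : String) : Int :=
  if begin_letter = target_letter then 0
  else
    match index_getter begin_letter with
    | none => 0   -- UnboundLocalError (excluded by Pre_)
    | some letter_index => pvLoopA target_letter letter_index 30 0 begin_letter

-- ===== PORT B =====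
def index_getter_alt (some_letter : String) : Option Int :=
  (PySem.List.pyRange 0 26 1).foldl
    (fun acc x => if PySem.List.pyGet? pvAlphabet x = some some_letter then some x else acc) none

def right_iteration_alt (begin_letter : String) (target_letter : String) : Int :=
  if begin_letter = target_letter then 0
  else
    match index_getter_alt target_letter, index_getter_alt begin_letter with
    | some ti, some bi => PySem.Int.mod (ti - bi) 26
    | _, _ => 0   -- UnboundLocalError (excluded by Pre_)

-- ===== PRECONDITION & SPEC =====
-- Pre_ = exactly the inputs on which A returns normally: equal strings, or both letters in the
-- alphabet with target either 'A' or at or right of begin (otherwise A's walk raises IndexError,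
-- and an unknown begin raises UnboundLocalError).
def Pre_right_iteration (begin_letter : String) (target_letter : String) : Prop :=
  begin_letter = target_letter ∨
    (begin_letter ∈ pvAlphabet ∧ target_letter ∈ pvAlphabet ∧
      (target_letter = "A" ∨
        pvAlphabet.idxOf begin_letter ≤ pvAlphabet.idxOf target_letter))
instance (begin_letter : String) (target_letter : String) : Decidable (Pre_right_iteration begin_letter target_letter) := by unfold Pre_right_iteration; infer_instance

def pvWitness_right_iteration : String × String := ("C", "F")

-- On distinct alphabet letters with target strictly left of begin and target ≠ "A", A's walk
-- indexes past the end of the alphabet and raises IndexError, while B returns (ti - bi) % 26.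
def Raises_right_iteration (begin_letter : String) (target_letter : String) : Prop :=
  begin_letter ∈ pvAlphabet ∧ target_letter ∈ pvAlphabet ∧ target_letter ≠ "A" ∧
    pvAlphabet.idxOf target_letter < pvAlphabet.idxOf begin_letter
instance (begin_letter : String) (target_letter : String) : Decidable (Raises_right_iteration begin_letter target_letter) := by unfold Raises_right_iteration; infer_instance
def pvRaiseWitness_right_iteration : String × String := ("C", "B")
def pvRaiseWitnessOut_right_iteration : Int := 25

def Spec_right_iteration (begin_letter : String) (target_letter : String) (out : Int) : Prop := out = right_iteration_alt begin_letter target_letter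
instance (begin_letter : String) (target_letter : String) (out : Int) : Decidable (Spec_right_iteration begin_letter target_letter out) := by unfold Spec_right_iteration; infer_instance

-- ===== CLAIM (what is proved, stated in full; the proofs are below) =====
def Claim_equal_right_iteration : Prop := ∀ (begin_letter : String) (target_letter : String), Dom_right_iteration begin_letter target_letter → Pre_right_iteration begin_letter target_letter → Spec_right_iteration begin_letter target_letter (right_iteration begin_letter target_letter)

def Claim_raises_right_iteration : Prop := (∀ (begin_letter : String) (target_letter : String), Dom_right_iteration begin_letter target_letter → Raises_right_iteration begin_letter target_letter → ¬ Pre_right_iteration begin_letter target_letter) ∧ (Dom_right_iteration (pvRaiseWitness_right_iteration.1) (pvRaiseWitness_right_iteration.2) ∧ Raises_right_iteration (pvRaiseWitness_right_iteration.1) (pvRaiseWitness_right_iteration.2) ∧ right_iteration_alt (pvRaiseWitness_right_iteration.1) (pvRaiseWitness_right_iteration.2) = pvRaiseWitnessOut_right_iteration)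

-- ===== LEMMAS AND PROOFS =====

theorem pv_mem_eq_case (b t : String) (hb : b ∈ pvAlphabet) (ht : t ∈ pvAlphabet)
    (hc : t = "A" ∨ pvAlphabet.idxOf b ≤ pvAlphabet.idxOf t) :
    right_iteration b t = right_iteration_alt b t := by
  revert hc
  fin_cases hb <;> fin_cases ht <;> decide

-- ===== VERDICT (by name: the statement is the Claim_ definition above) =====
theorem right_iteration_spec : Claim_equal_right_iteration := by
  intro b t _ hpre
  unfold Spec_right_iteration
  rcases hpre with h | ⟨hb, ht, hc⟩
  · subst h; simp [right_iteration, right_iteration_alt]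
  · exact pv_mem_eq_case b t hb ht hc

@[simp] theorem right_iteration_raises : Claim_raises_right_iteration := by
  unfold Claim_raises_right_iteration
  refine ⟨?_, by decide⟩
  intro b t _ ⟨hb, ht, hne, hlt⟩ hpre
  rcases hpre with h | ⟨_, _, hc⟩
  · subst h; omega
  · rcases hc with h | h
    · exact hne h
    · omega
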